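-- pv_equiv track=rewrite | github.com/emanuelanechei/numerology-python-app | reduce.py | numerologize
-- ===== SOURCE A (Python) =====
-- def numerologize(num, masters):
--     if masters is not False:
--         masters = [11,22,33]
--
--     lis = list(str(num))
--     y = 0
--
--     for l in lis:
--         y += int(l)
--
--     if y < 10 or masters.__contains__(y):
--         return y
--     else:
--         return numerologize(str(y), masters)
-- ===== SOURCE B (Python) =====
-- def numerologize(num, masters):
--     # Iterative reduction with arithmetic digit extraction (no string conversion).
--     n = num
--     while True:
--         s = 0
--         m = n
--         while m > 0:
--             s += m % 10
--             m //= 10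
--         if s < 10 or (masters and s in (11, 22, 33)):
--             return s
--         n = s
-- ===== Notes on version B (the rewrite author's own statement) =====
-- stated objective: alternative
-- what changed: Replaces A's recursion over the characters of str(num) (summing int(c) per character) by an explicit iterative loop that extracts digits arithmetically with % 10 and // 10, never converting to strings.
import Mathlib
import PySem

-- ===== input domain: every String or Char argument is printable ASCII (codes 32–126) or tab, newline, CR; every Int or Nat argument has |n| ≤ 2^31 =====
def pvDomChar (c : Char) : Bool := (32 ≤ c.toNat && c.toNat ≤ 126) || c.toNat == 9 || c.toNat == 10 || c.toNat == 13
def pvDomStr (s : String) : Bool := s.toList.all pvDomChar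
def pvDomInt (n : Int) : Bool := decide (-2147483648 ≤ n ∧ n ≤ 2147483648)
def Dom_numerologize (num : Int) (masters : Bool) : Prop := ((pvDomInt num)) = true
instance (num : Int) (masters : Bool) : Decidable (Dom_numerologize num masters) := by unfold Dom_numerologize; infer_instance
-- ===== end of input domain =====

-- B re-implements the iterated digit-sum reduction as an explicit loop with arithmetic
-- digit extraction (% 10, // 10) instead of A's recursion over the characters of str(num).

-- ===== PORT A =====
-- digitSumLoop is port B's inner while-loop ('while m > 0: s += m % 10; m //= 10');
-- it is defined first because port A's termination argument cites pyDigitSumA_eq below.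
def digitSumLoop (n : Nat) : Nat :=
  if n = 0 then 0 else n % 10 + digitSumLoop (n / 10)
decreasing_by exact Nat.div_lt_self (Nat.pos_of_ne_zero (by assumption)) (by norm_num)

lemma digitSumLoop_zero : digitSumLoop 0 = 0 := by
  rw [digitSumLoop]; simp

lemma digitSumLoop_le (n : Nat) : digitSumLoop n ≤ n := by
  induction n using Nat.strong_induction_on with
  | _ n ih =>
    rw [digitSumLoop]
    by_cases h : n = 0
    · simp [h]
    · rw [if_neg h]
      have h1 : digitSumLoop (n / 10) ≤ n / 10 := ih _ (Nat.div_lt_self (Nat.pos_of_ne_zero h) (by norm_num))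
      omega

lemma digitSumLoop_lt (n : Nat) (h : 10 ≤ digitSumLoop n) : digitSumLoop n < n := by
  have hle := digitSumLoop_le n
  have h10 : 10 ≤ n := le_trans h hle
  rw [digitSumLoop, if_neg (by omega)] at *
  have h1 : digitSumLoop (n / 10) ≤ n / 10 := digitSumLoop_le _
  omega

-- int(l) for a single character l, as A's loop body computes it (getD 0 is never
-- used on inputs where A returns: there every character of str(num) is a digit)
def pyCharVal (l : Char) : Int := (PySem.Int.ofStr? (String.ofList [l])).getD 0

-- y = 0; for l in list(str(num)): y += int(l)
def pyDigitSumA (num : Int) : Int :=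
  (PySem.Int.toStr num).toList.foldl (fun y l => y + pyCharVal l) 0

lemma pyCharVal_digitChar (d : Nat) (h : d < 10) : pyCharVal (Nat.digitChar d) = (d : Int) := by
  interval_cases d <;> decide

lemma sum_toDigitsCore (f : Nat) : ∀ (n : Nat) (acc : List Char), n < 10 ^ f →
    ((Nat.toDigitsCore 10 f n acc).map pyCharVal).sum
      = (digitSumLoop n : Int) + (acc.map pyCharVal).sum := by
  induction f with
  | zero =>
    intro n acc h
    have hn : n = 0 := by simpa using h
    subst hn
    rw [digitSumLoop]
    simp [Nat.toDigitsCore]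
  | succ f ih =>
    intro n acc h
    by_cases h0 : n / 10 = 0
    · have hn : n < 10 := by omega
      have hds : digitSumLoop n = n % 10 := by
        rw [digitSumLoop, h0, digitSumLoop_zero]
        split_ifs with hz <;> omega
      simp [Nat.toDigitsCore, h0, pyCharVal_digitChar (n % 10) (by omega), hds]
    · have hlt : n / 10 < 10 ^ f := by
        exact Nat.div_lt_of_lt_mul (by rw [mul_comm, ← pow_succ]; exact h)
      have hstep : Nat.toDigitsCore 10 (f + 1) n acc
          = Nat.toDigitsCore 10 f (n / 10) (Nat.digitChar (n % 10) :: acc) := by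
        simp [Nat.toDigitsCore, h0]
      rw [hstep, ih _ _ hlt]
      have hds : digitSumLoop n = n % 10 + digitSumLoop (n / 10) := by
        rw [digitSumLoop, if_neg (by omega)]
      rw [hds]
      simp [pyCharVal_digitChar (n % 10) (by omega)]
      ring

-- A's string digit sum equals B's arithmetic digit sum on nonnegative integers
lemma pyDigitSumA_eq (n : Nat) : pyDigitSumA (n : Int) = (digitSumLoop n : Int) := by
  unfold pyDigitSumA
  rw [PySem.List.foldl_add]
  have h1 : (PySem.Int.toStr (n : Int)).toList = Nat.toDigits 10 n := by
    rw [PySem.Int.toList_toStr]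
    simp [PySem.Int.toChars]
  have h2 : n < 10 ^ (n + 1) :=
    lt_of_lt_of_le (Nat.lt_pow_self (by norm_num)) (Nat.pow_le_pow_right (by norm_num) (by omega))
  rw [h1]
  unfold Nat.toDigits
  rw [sum_toDigitsCore (n + 1) n [] h2]
  simp

-- the recursion of A ('return numerologize(str(y), masters)'; str(y) has the same
-- characters as str(num) would for num = y, so the state is the integer y)
def numGoA (n : Nat) (masters : Bool) : Int :=
  if pyDigitSumA (n : Int) < 10 ∨ (masters = true ∧ pyDigitSumA (n : Int) ∈ ([11, 22, 33] : List Int)) then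
    pyDigitSumA (n : Int)
  else
    numGoA (pyDigitSumA (n : Int)).toNat masters
termination_by n
decreasing_by
  rw [pyDigitSumA_eq, Int.toNat_natCast]
  rename_i hcond
  rw [pyDigitSumA_eq] at hcond
  push_neg at hcond
  exact digitSumLoop_lt n (by exact_mod_cast hcond.1)

-- Python A raises ValueError on negative num (int('-')); those inputs are outside
-- Pre_numerologize and the guard below only makes the port total there.
def numerologize (num : Int) (masters : Bool) : Int :=
  if num < 0 then 0 else numGoA num.toNat masters

-- ===== PORT B =====
-- outer 'while True' loop of B; its digit sum is digitSumLoop (defined above):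
-- for m ≤ 0 the inner 'while m > 0' loop runs zero times, hence m.toNat is exact
def numGoB (n : Int) (masters : Bool) : Int :=
  if decide ((digitSumLoop n.toNat : Int) < 10)
      || (masters && ((digitSumLoop n.toNat : Int) == 11
            || (digitSumLoop n.toNat : Int) == 22 || (digitSumLoop n.toNat : Int) == 33)) then
    (digitSumLoop n.toNat : Int)
  else
    numGoB (digitSumLoop n.toNat : Int) masters
termination_by n.toNat
decreasing_by
  rw [Int.toNat_natCast]
  rename_i hcond
  simp only [Bool.or_eq_true, decide_eq_true_eq] at hcond
  push_neg at hcond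
  exact digitSumLoop_lt n.toNat (by exact_mod_cast hcond.1)

def numerologize_alt (num : Int) (masters : Bool) : Int := numGoB num masters

-- ===== PRECONDITION & SPEC =====
-- preDS f n = digit sum of n when f bounds the digit count; preDS n n is the exact
-- digit sum of EVERY n (a number n ≥ 1 has at most n digits), so no size cap is
-- introduced; structural recursion so that 'decide' evaluates it.
def preDS : Nat → Nat → Nat
  | 0, _ => 0
  | f + 1, n => if n = 0 then 0 else n % 10 + preDS f (n / 10)

-- Pre_ excludes exactly the inputs on which Python A raises: negative num
-- (ValueError from int('-') on the sign character) and masters = False with the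
-- first digit sum ≥ 10 (AttributeError from False.__contains__ after the
-- short-circuit 'y < 10 or' fails); preDS num.toNat num.toNat is that first digit sum.
def Pre_numerologize (num : Int) (masters : Bool) : Prop :=
  0 ≤ num ∧ (masters = true ∨ preDS num.toNat num.toNat < 10)
instance (num : Int) (masters : Bool) : Decidable (Pre_numerologize num masters) := by unfold Pre_numerologize; infer_instance
def pvWitness_numerologize : Int × Bool := (29, true)

def Spec_numerologize (num : Int) (masters : Bool) (out : Int) : Prop := out = numerologize_alt num masters
instance (num : Int) (masters : Bool) (out : Int) : Decidable (Spec_numerologize num masters out) := by unfold Spec_numerologize; infer_instance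

-- ===== CLAIM (what is proved, stated in full; the proofs are below) =====
def Claim_equal_numerologize : Prop := ∀ (num : Int) (masters : Bool), Dom_numerologize num masters → Pre_numerologize num masters → Spec_numerologize num masters (numerologize num masters)

-- ===== LEMMAS AND PROOFS =====

lemma numGoA_eq_numGoB (n : Nat) (masters : Bool) : numGoA n masters = numGoB (n : Int) masters := by
  induction n using Nat.strong_induction_on with
  | _ n ih =>
    rw [numGoA, numGoB, pyDigitSumA_eq]
    simp only [Int.toNat_natCast]
    have hiff : (decide ((digitSumLoop n : Int) < 10)
        || (masters && ((digitSumLoop n : Int) == 11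
              || (digitSumLoop n : Int) == 22 || (digitSumLoop n : Int) == 33))) = true
        ↔ ((digitSumLoop n : Int) < 10
            ∨ (masters = true ∧ (digitSumLoop n : Int) ∈ ([11, 22, 33] : List Int))) := by
      simp [List.mem_cons, or_assoc]
    split_ifs with h1 h2 h2
    · rfl
    · exact absurd (hiff.mpr h1) h2
    · exact absurd (hiff.mp h2) h1
    · have hge : 10 ≤ digitSumLoop n := by
        push_neg at h1
        exact_mod_cast h1.1
      exact ih _ (digitSumLoop_lt n hge)

-- ===== VERDICT (by name: the statement is the Claim_ definition above) =====
theorem numerologize_spec : Claim_equal_numerologize := by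
  unfold Claim_equal_numerologize
  intro num masters _ hpre
  obtain ⟨h0, -⟩ := hpre
  unfold Spec_numerologize numerologize numerologize_alt
  rw [if_neg (by omega : ¬ num < 0), numGoA_eq_numGoB, Int.toNat_of_nonneg h0]
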